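-- pv_equiv track=rewrite | github.com/shasank0001/HealthRevo | backend/app/routers/prescriptions.py | _parse_free_text_prescription
-- ===== SOURCE A (Python) =====
-- from typing import List, Dict, Any
--
-- def _parse_free_text_prescription(text: str) -> List[Dict[str, str]]:
-- 	"""Very simple heuristic parser: split by line breaks and extract medication lines.
-- 	Expected formats like:
-- 	  - "Tab. Amoxicillin" followed by strength/dose/frequency lines
-- 	This returns a list of { name, dose, frequency, instructions } objects.
-- 	"""
-- 	meds: List[Dict[str, str]] = []
-- 	lines = [l.strip() for l in text.splitlines() if l.strip()]
-- 	current: Dict[str, str] | None = None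
-- 	for ln in lines:
-- 		lower = ln.lower()
-- 		if lower.startswith(("1.", "2.", "3.", "4.", "5.")) or lower.startswith(("tab", "cap", "syr", "inj")) or "tablet" in lower:
-- 			# start new med
-- 			if current:
-- 				meds.append(current)
-- 			name = ln
-- 			# remove leading numbering and common prefixes
-- 			name = name.lstrip("0123456789. ")
-- 			name = name.replace("Tab.", "").replace("Cap.", "").replace("Syr.", "").strip()
-- 			current = {"name": name, "dose": "", "frequency": "", "instructions": ""}
-- 		elif current and ("mg" in lower or "ml" in lower or "strength" in lower):
-- 			current["dose"] = ln
-- 		elif current and ("once" in lower or "twice" in lower or "three" in lower or "every" in lower or "times a day" in lower or "sos" in lower):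
-- 			current["frequency"] = ln
-- 		elif current and ("gargle" in lower or "with" in lower or "after meals" in lower or "as needed" in lower):
-- 			# capture general instruction lines
-- 			if current.get("instructions"):
-- 				current["instructions"] += " " + ln
-- 			else:
-- 				current["instructions"] = ln
-- 		else:
-- 			# ignore quantities/refills/advice for now
-- 			pass
-- 	if current:
-- 		meds.append(current)
-- 	# cleanup
-- 	for m in meds:
-- 		m["name"] = m["name"].strip()
-- 		m["dose"] = m["dose"].strip()
-- 		m["frequency"] = m["frequency"].strip()
-- 		if not m["instructions"]:
-- 			m.pop("instructions", None)
-- 	return meds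
-- ===== SOURCE B (Python) =====
-- from typing import List, Dict
--
-- def _is_header(ln: str) -> bool:
-- 	low = ln.lower()
-- 	return (low.startswith(("1.", "2.", "3.", "4.", "5."))
-- 		or low.startswith(("tab", "cap", "syr", "inj"))
-- 		or "tablet" in low)
--
-- def _clean_name(ln: str) -> str:
-- 	name = ln.lstrip("0123456789. ")
-- 	return name.replace("Tab.", "").replace("Cap.", "").replace("Syr.", "").strip()
--
-- def _make_med(group: List[str]) -> Dict[str, str]:
-- 	dose = ""
-- 	freq = ""
-- 	instr = ""
-- 	for ln in group[1:]:
-- 		low = ln.lower()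
-- 		if "mg" in low or "ml" in low or "strength" in low:
-- 			dose = ln
-- 		elif ("once" in low or "twice" in low or "three" in low or "every" in low
-- 				or "times a day" in low or "sos" in low):
-- 			freq = ln
-- 		elif "gargle" in low or "with" in low or "after meals" in low or "as needed" in low:
-- 			instr = instr + " " + ln if instr else ln
-- 	med = {"name": _clean_name(group[0]), "dose": dose, "frequency": freq}
-- 	if instr:
-- 		med["instructions"] = instr
-- 	return med
--
-- def _parse_free_text_prescription(text: str) -> List[Dict[str, str]]:
-- 	lines = [l.strip() for l in text.splitlines() if l.strip()]
-- 	groups: List[List[str]] = []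
-- 	for ln in lines:
-- 		if _is_header(ln):
-- 			groups.append([ln])
-- 		elif groups:
-- 			groups[-1].append(ln)
-- 	return [_make_med(g) for g in groups]
-- ===== Notes on version B (the rewrite author's own statement) =====
-- stated objective: alternative
-- what changed: Replaced A's single stateful pass carrying a pending mutable dict (flushed on each header) plus a mutating cleanup loop by a two-phase decomposition: first partition the cleaned lines into header-led groups (dropping lines before the first header), then map each group independently to its medication record.
import Mathlib
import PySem

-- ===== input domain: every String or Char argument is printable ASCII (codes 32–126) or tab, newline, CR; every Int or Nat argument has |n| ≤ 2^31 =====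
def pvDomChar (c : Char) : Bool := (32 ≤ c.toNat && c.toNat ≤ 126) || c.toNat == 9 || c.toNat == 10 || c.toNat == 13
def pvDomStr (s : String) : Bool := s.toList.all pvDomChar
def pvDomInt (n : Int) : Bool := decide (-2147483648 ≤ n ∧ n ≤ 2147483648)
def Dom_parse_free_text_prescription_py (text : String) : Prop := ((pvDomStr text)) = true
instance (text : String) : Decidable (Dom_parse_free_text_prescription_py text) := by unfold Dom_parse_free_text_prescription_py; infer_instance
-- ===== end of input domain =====

-- B re-implements the heuristic parser by a grouping/transform decomposition (partition cleaned
-- lines into header-led groups, then map each group to a record) instead of A's single stateful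
-- loop with a pending dict; objective: alternative decomposition, equal cost.


-- shared primitive helpers (both Python sources contain these very expressions)

-- [l.strip() for l in text.splitlines() if l.strip()]
def pvCleanLines (text : String) : List String :=
  ((PySem.Str.splitlines text).map PySem.Str.strip).filter (fun l => l ≠ "")

-- name.lstrip("0123456789. ")  (drop leading chars belonging to the set; exact port)
def pvLstripNum (s : String) : String :=
  String.ofList (s.toList.dropWhile (fun c => ("0123456789. ".toList).contains c))

-- name cleanup: lstrip numbering, remove "Tab."/"Cap."/"Syr.", strip
def pvCleanName (ln : String) : String :=
  PySem.Str.strip (PySem.Str.replace (PySem.Str.replace (PySem.Str.replace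
    (pvLstripNum ln) "Tab." "") "Cap." "") "Syr." "")

-- old + " " + ln
def pvConcatSp (old ln : String) : String := String.ofList (old.toList ++ (' ' :: ln.toList))

-- ===== PORT A =====
-- one iteration of A's loop over (meds, current)
def pvStepA (st : List (PySem.Dict String String) × Option (PySem.Dict String String))
    (ln : String) : List (PySem.Dict String String) × Option (PySem.Dict String String) :=
  let lower := PySem.Str.lower ln
  if PySem.Str.startswith lower "1." || PySem.Str.startswith lower "2." ||
     PySem.Str.startswith lower "3." || PySem.Str.startswith lower "4." ||
     PySem.Str.startswith lower "5." ||
     PySem.Str.startswith lower "tab" || PySem.Str.startswith lower "cap" ||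
     PySem.Str.startswith lower "syr" || PySem.Str.startswith lower "inj" ||
     PySem.Str.isIn "tablet" lower then
    -- start new med (a `current` dict is never empty, so `if current:` = isSome)
    ((match st.2 with | some c => st.1 ++ [c] | none => st.1),
     some (PySem.Dict.mk [("name", pvCleanName ln), ("dose", ""), ("frequency", ""), ("instructions", "")]))
  else
    match st.2 with
    | none => st   -- `current` is falsy: all elif guards fail
    | some c =>
      if PySem.Str.isIn "mg" lower || PySem.Str.isIn "ml" lower || PySem.Str.isIn "strength" lower then
        (st.1, some (c.insert "dose" ln))
      else if PySem.Str.isIn "once" lower || PySem.Str.isIn "twice" lower ||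
              PySem.Str.isIn "three" lower || PySem.Str.isIn "every" lower ||
              PySem.Str.isIn "times a day" lower || PySem.Str.isIn "sos" lower then
        (st.1, some (c.insert "frequency" ln))
      else if PySem.Str.isIn "gargle" lower || PySem.Str.isIn "with" lower ||
              PySem.Str.isIn "after meals" lower || PySem.Str.isIn "as needed" lower then
        -- current.get("instructions") is always present; "" is falsy
        (st.1, some (c.insert "instructions"
          (if ((c.get? "instructions").getD "") ≠ ""
           then pvConcatSp ((c.get? "instructions").getD "") ln else ln)))
      else st

-- the final cleanup loop body (every key is present in the dict by construction)
def pvCleanupA (m : PySem.Dict String String) : PySem.Dict String String :=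
  let m1 := m.insert "name" (PySem.Str.strip ((m.get? "name").getD ""))
  let m2 := m1.insert "dose" (PySem.Str.strip ((m1.get? "dose").getD ""))
  let m3 := m2.insert "frequency" (PySem.Str.strip ((m2.get? "frequency").getD ""))
  if ((m3.get? "instructions").getD "") = "" then m3.erase "instructions" else m3

def parse_free_text_prescription_py (text : String) : List (List (String × String)) :=
  let lines := pvCleanLines text
  let st := lines.foldl pvStepA ([], none)
  let meds := match st.2 with | some c => st.1 ++ [c] | none => st.1
  (meds.map pvCleanupA).map PySem.Dict.items

-- ===== PORT B =====
def pvIsHeader (ln : String) : Bool :=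
  let low := PySem.Str.lower ln
  PySem.Str.startswith low "1." || PySem.Str.startswith low "2." ||
  PySem.Str.startswith low "3." || PySem.Str.startswith low "4." ||
  PySem.Str.startswith low "5." ||
  PySem.Str.startswith low "tab" || PySem.Str.startswith low "cap" ||
  PySem.Str.startswith low "syr" || PySem.Str.startswith low "inj" ||
  PySem.Str.isIn "tablet" low

-- groups[-1].append(ln)
def pvUpdLast : List (List String) → String → List (List String)
  | [], _ => []
  | [g], ln => [g ++ [ln]]
  | g :: h :: t, ln => g :: pvUpdLast (h :: t) ln

def pvGroupStep (gs : List (List String)) (ln : String) : List (List String) :=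
  if pvIsHeader ln then gs ++ [[ln]]
  else match gs with
    | [] => gs
    | _ :: _ => pvUpdLast gs ln

def pvMakeMedStep (st : String × String × String) (ln : String) : String × String × String :=
  let low := PySem.Str.lower ln
  if PySem.Str.isIn "mg" low || PySem.Str.isIn "ml" low || PySem.Str.isIn "strength" low then
    (ln, st.2.1, st.2.2)
  else if PySem.Str.isIn "once" low || PySem.Str.isIn "twice" low ||
          PySem.Str.isIn "three" low || PySem.Str.isIn "every" low ||
          PySem.Str.isIn "times a day" low || PySem.Str.isIn "sos" low then
    (st.1, ln, st.2.2)
  else if PySem.Str.isIn "gargle" low || PySem.Str.isIn "with" low ||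
          PySem.Str.isIn "after meals" low || PySem.Str.isIn "as needed" low then
    (st.1, st.2.1, if st.2.2 ≠ "" then pvConcatSp st.2.2 ln else ln)
  else st

-- a group is never empty, so group[0] = headD ""
def pvMakeMed (g : List String) : List (String × String) :=
  let st := (g.drop 1).foldl pvMakeMedStep ("", "", "")
  [("name", pvCleanName (g.headD "")), ("dose", st.1), ("frequency", st.2.1)] ++
    (if st.2.2 ≠ "" then [("instructions", st.2.2)] else [])

def parse_free_text_prescription_py_alt (text : String) : List (List (String × String)) :=
  (((pvCleanLines text).foldl pvGroupStep []).map pvMakeMed)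

-- ===== PRECONDITION & SPEC =====
def Spec_parse_free_text_prescription_py (text : String) (out : List (List (String × String))) : Prop := out = parse_free_text_prescription_py_alt text
instance (text : String) (out : List (List (String × String))) : Decidable (Spec_parse_free_text_prescription_py text out) := by unfold Spec_parse_free_text_prescription_py; infer_instance

-- ===== CLAIM (what is proved, stated in full; the proofs are below) =====
def Claim_equal_parse_free_text_prescription_py : Prop := ∀ (text : String), Dom_parse_free_text_prescription_py text → Spec_parse_free_text_prescription_py text (parse_free_text_prescription_py text)

-- ===== LEMMAS AND PROOFS =====

-- the dict A maintains for the pending group: head line creates it, tail lines update it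
def pvInner (c : PySem.Dict String String) (ln : String) : PySem.Dict String String :=
  let lower := PySem.Str.lower ln
  if PySem.Str.isIn "mg" lower || PySem.Str.isIn "ml" lower || PySem.Str.isIn "strength" lower then
    c.insert "dose" ln
  else if PySem.Str.isIn "once" lower || PySem.Str.isIn "twice" lower ||
          PySem.Str.isIn "three" lower || PySem.Str.isIn "every" lower ||
          PySem.Str.isIn "times a day" lower || PySem.Str.isIn "sos" lower then
    c.insert "frequency" ln
  else if PySem.Str.isIn "gargle" lower || PySem.Str.isIn "with" lower ||
          PySem.Str.isIn "after meals" lower || PySem.Str.isIn "as needed" lower then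
    c.insert "instructions"
      (if ((c.get? "instructions").getD "") ≠ ""
       then pvConcatSp ((c.get? "instructions").getD "") ln else ln)
  else c

def pvDictOf (g : List String) : PySem.Dict String String :=
  (g.drop 1).foldl pvInner
    (PySem.Dict.mk [("name", pvCleanName (g.headD "")), ("dose", ""), ("frequency", ""), ("instructions", "")])

def pvAStateOf (gs : List (List String)) :
    List (PySem.Dict String String) × Option (PySem.Dict String String) :=
  match gs.getLast? with
  | none => ([], none)
  | some g => (gs.dropLast.map pvDictOf, some (pvDictOf g))

lemma pvStepA_header (st) (ln : String) (h : pvIsHeader ln = true) :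
    pvStepA st ln = ((match st.2 with | some c => st.1 ++ [c] | none => st.1),
     some (PySem.Dict.mk [("name", pvCleanName ln), ("dose", ""), ("frequency", ""), ("instructions", "")])) := by
  simp only [pvIsHeader] at h
  simp only [pvStepA]
  rw [if_pos h]

lemma pvStepA_nonheader (ms) (c) (ln : String) (h : pvIsHeader ln = false) :
    pvStepA (ms, some c) ln = (ms, some (pvInner c ln)) := by
  simp only [pvIsHeader] at h
  simp only [pvStepA, pvInner]
  rw [if_neg (by simp only [h]; exact Bool.false_ne_true)]
  split_ifs <;> rfl

lemma pvStepA_none (ms) (ln : String) (h : pvIsHeader ln = false) :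
    pvStepA (ms, none) ln = (ms, none) := by
  simp only [pvIsHeader] at h
  simp only [pvStepA]
  rw [if_neg (by simp only [h]; exact Bool.false_ne_true)]

lemma pvUpdLast_eq (gs : List (List String)) (hgs : gs ≠ []) (ln : String) :
    pvUpdLast gs ln = gs.dropLast ++ [gs.getLast hgs ++ [ln]] := by
  induction gs with
  | nil => exact absurd rfl hgs
  | cons g t ih =>
    cases t with
    | nil => simp [pvUpdLast]
    | cons h' t' =>
      simp only [pvUpdLast, ih (by simp)]
      simp [List.getLast_cons]


lemma pvDw_self (p : Char → Bool) (y : List Char) (hy : List.dropWhile p y = y) :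
    List.dropWhile p ((List.dropWhile p y.reverse).reverse) = (List.dropWhile p y.reverse).reverse := by
  have hpre : (List.dropWhile p y.reverse).reverse <+: y := by
    have : List.dropWhile p y.reverse <:+ y.reverse := List.dropWhile_suffix p
    simpa using this.reverse
  cases hr : (List.dropWhile p y.reverse).reverse with
  | nil => simp
  | cons a t =>
    obtain ⟨u, hu⟩ := hpre
    rw [hr] at hu
    have hy' : y = a :: (t ++ u) := by simpa using hu.symm
    have hpa : p a = false := by
      by_contra hpa
      have hpa' : p a = true := by simpa using hpa
      rw [hy', List.dropWhile_cons_of_pos hpa'] at hy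
      have h1 := congrArg List.length hy
      have h2 := List.length_dropWhile_le p (t ++ u)
      simp only [List.length_cons] at h1
      omega
    rw [List.dropWhile_cons_of_neg (by simp [hpa])]

lemma pvChars_strip_idem (s : List Char) :
    PySem.Chars.strip (PySem.Chars.strip s) = PySem.Chars.strip s := by
  unfold PySem.Chars.strip PySem.Chars.rstrip PySem.Chars.lstrip
  rw [pvDw_self _ _ (List.dropWhile_idempotent _ _), List.reverse_reverse]
  exact pvDw_self _ _ (List.dropWhile_idempotent _ _)

lemma pvInner_concat (g : List String) (hg : g ≠ []) (ln : String) :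
    pvDictOf (g ++ [ln]) = pvInner (pvDictOf g) ln := by
  cases g with
  | nil => exact absurd rfl hg
  | cons a t => simp [pvDictOf, List.foldl_append]

lemma pvStep_commute (gs : List (List String)) (hgs : ∀ g ∈ gs, g ≠ []) (ln : String) :
    pvStepA (pvAStateOf gs) ln = pvAStateOf (pvGroupStep gs ln) := by
  by_cases hh : pvIsHeader ln = true
  · rw [pvStepA_header _ _ hh]
    unfold pvGroupStep
    rw [if_pos hh]
    cases gs with
    | nil => simp [pvAStateOf, pvDictOf]
    | cons g t =>
      have hne : g :: t ≠ [] := by simp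
      have hst : pvAStateOf (g :: t)
          = ((g :: t).dropLast.map pvDictOf, some (pvDictOf ((g :: t).getLast hne))) := by
        unfold pvAStateOf
        rw [List.getLast?_eq_some_getLast hne]
      have hst2 : pvAStateOf ((g :: t) ++ [[ln]])
          = ((g :: t).map pvDictOf, some (pvDictOf [ln])) := by
        unfold pvAStateOf
        rw [List.getLast?_concat, List.dropLast_concat]
      rw [hst, hst2]
      refine Prod.ext ?_ rfl
    
      show (g :: t).dropLast.map pvDictOf ++ [pvDictOf ((g :: t).getLast hne)]
          = (g :: t).map pvDictOf
      rw [show [pvDictOf ((g :: t).getLast hne)]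
          = List.map pvDictOf [(g :: t).getLast hne] from rfl,
        ← List.map_append, List.dropLast_concat_getLast]
  · have hh' : pvIsHeader ln = false := by simpa using hh
    unfold pvGroupStep
    rw [if_neg (by simp [hh'])]
    cases gs with
    | nil => exact pvStepA_none _ _ hh'
    | cons g t =>
      have hne : g :: t ≠ [] := by simp
      have hst : pvAStateOf (g :: t)
          = ((g :: t).dropLast.map pvDictOf, some (pvDictOf ((g :: t).getLast hne))) := by
        unfold pvAStateOf
        rw [List.getLast?_eq_some_getLast hne]
      have hst2 : pvAStateOf ((g :: t).dropLast ++ [(g :: t).getLast hne ++ [ln]])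
          = ((g :: t).dropLast.map pvDictOf, some (pvDictOf ((g :: t).getLast hne ++ [ln]))) := by
        unfold pvAStateOf
        rw [List.getLast?_concat, List.dropLast_concat]
      rw [pvUpdLast_eq (g :: t) hne ln, hst, pvStepA_nonheader _ _ _ hh', hst2,
        pvInner_concat _ (hgs _ (List.getLast_mem hne)) ln]

lemma pvGroupStep_wf (gs : List (List String)) (hgs : ∀ g ∈ gs, g ≠ []) (ln : String) :
    ∀ g ∈ pvGroupStep gs ln, g ≠ [] := by
  unfold pvGroupStep
  split_ifs with hh
  · intro g hg
    rcases List.mem_append.mp hg with h | h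
    · exact hgs _ h
    · simp at h; simp [h]
  · cases gs with
    | nil => exact hgs
    | cons a t =>
      rw [pvUpdLast_eq (a :: t) (by simp) ln]
      intro g hg
      rcases List.mem_append.mp hg with h | h
      · exact hgs _ (List.dropLast_subset _ h)
      · simp at h; simp [h]

lemma pvGroupStep_mem (P : String → Prop) (gs : List (List String))
    (hgs : ∀ g ∈ gs, ∀ l ∈ g, P l) (ln : String) (hln : P ln) :
    ∀ g ∈ pvGroupStep gs ln, ∀ l ∈ g, P l := by
  unfold pvGroupStep
  split_ifs with hh
  · intro g hg
    rcases List.mem_append.mp hg with h | h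
    · exact hgs _ h
    · simp at h; subst h; intro l hl; simp at hl; subst hl; exact hln
  · cases gs with
    | nil => exact hgs
    | cons a t =>
      rw [pvUpdLast_eq (a :: t) (by simp) ln]
      intro g hg
      rcases List.mem_append.mp hg with h | h
      · exact hgs _ (List.dropLast_subset _ h)
      · simp at h
        subst h
        intro l hl
        rcases List.mem_append.mp hl with h' | h'
        · exact hgs _ (List.getLast_mem _) _ h'
        · simp at h'; subst h'; exact hln

lemma pvMain_fold (lines : List String) : ∀ gs : List (List String),
    (∀ g ∈ gs, g ≠ []) →
    lines.foldl pvStepA (pvAStateOf gs) = pvAStateOf (lines.foldl pvGroupStep gs) := by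
  induction lines with
  | nil => intro gs hgs; rfl
  | cons ln rest ih =>
    intro gs hgs
    rw [List.foldl_cons, List.foldl_cons, pvStep_commute gs hgs ln]
    exact ih _ (pvGroupStep_wf gs hgs ln)

lemma pvGroups_nonempty (lines : List String) : ∀ gs : List (List String),
    (∀ g ∈ gs, g ≠ []) → ∀ g ∈ lines.foldl pvGroupStep gs, g ≠ [] := by
  induction lines with
  | nil => intro gs hgs; exact hgs
  | cons ln rest ih =>
    intro gs hgs
    rw [List.foldl_cons]
    exact ih _ (pvGroupStep_wf gs hgs ln)

lemma pvGroups_mem (lines : List String) : ∀ gs : List (List String),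
    (∀ g ∈ gs, ∀ l ∈ g, PySem.Str.strip l = l) → (∀ l ∈ lines, PySem.Str.strip l = l) →
    ∀ g ∈ lines.foldl pvGroupStep gs, ∀ l ∈ g, PySem.Str.strip l = l := by
  induction lines with
  | nil => intro gs hgs _; exact hgs
  | cons ln rest ih =>
    intro gs hgs hlines
    rw [List.foldl_cons]
    exact ih _ (pvGroupStep_mem _ gs hgs ln (hlines ln (by simp)))
      (fun l hl => hlines l (by simp [hl]))

lemma pvStrip_idem (s : String) : PySem.Str.strip (PySem.Str.strip s) = PySem.Str.strip s := by
  rw [← String.toList_inj]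
  simp [PySem.Str.strip, pvChars_strip_idem]

lemma pvCleanLines_stripped (text : String) : ∀ l ∈ pvCleanLines text, PySem.Str.strip l = l := by
  intro l hl
  unfold pvCleanLines at hl
  obtain ⟨x, -, hx⟩ := List.mem_map.mp (List.mem_of_mem_filter hl)
  rw [← hx]
  exact pvStrip_idem x

lemma pvInner_shape (ln n d f i) :
    pvInner (PySem.Dict.mk [("name",n),("dose",d),("frequency",f),("instructions",i)]) ln
    = PySem.Dict.mk [("name",n),("dose",(pvMakeMedStep (d,f,i) ln).1),
        ("frequency",(pvMakeMedStep (d,f,i) ln).2.1),("instructions",(pvMakeMedStep (d,f,i) ln).2.2)] := by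
  simp only [pvInner, pvMakeMedStep]
  have hget : ((({ items := [("name", n), ("dose", d), ("frequency", f), ("instructions", i)] } :
      PySem.Dict String String).get? "instructions").getD "") = i := by
    simp [PySem.Dict.get?]
  rw [hget]
  split_ifs <;>
    simp [PySem.Dict.insert, PySem.Dict.contains]

lemma pvFoldl_shape (rest : List String) : ∀ n d f i,
    rest.foldl pvInner (PySem.Dict.mk [("name",n),("dose",d),("frequency",f),("instructions",i)])
    = PySem.Dict.mk [("name",n),("dose",(rest.foldl pvMakeMedStep (d,f,i)).1),
        ("frequency",(rest.foldl pvMakeMedStep (d,f,i)).2.1),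
        ("instructions",(rest.foldl pvMakeMedStep (d,f,i)).2.2)] := by
  induction rest with
  | nil => intro n d f i; rfl
  | cons ln rest ih =>
    intro n d f i
    rw [List.foldl_cons, List.foldl_cons, pvInner_shape]
    exact ih n _ _ _

lemma pvFold_stripped (rest : List String) : ∀ d f i,
    (∀ l ∈ rest, PySem.Str.strip l = l) → PySem.Str.strip d = d → PySem.Str.strip f = f →
    PySem.Str.strip (rest.foldl pvMakeMedStep (d,f,i)).1 = (rest.foldl pvMakeMedStep (d,f,i)).1 ∧
    PySem.Str.strip (rest.foldl pvMakeMedStep (d,f,i)).2.1 = (rest.foldl pvMakeMedStep (d,f,i)).2.1 := by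
  induction rest with
  | nil => intro d f i _ hd hf; exact ⟨hd, hf⟩
  | cons ln rest ih =>
    intro d f i hmem hd hf
    have hln : PySem.Str.strip ln = ln := hmem ln (by simp)
    have hmem' : ∀ l ∈ rest, PySem.Str.strip l = l := fun l hl => hmem l (by simp [hl])
    have hstep : PySem.Str.strip (pvMakeMedStep (d, f, i) ln).1 = (pvMakeMedStep (d, f, i) ln).1 ∧
        PySem.Str.strip (pvMakeMedStep (d, f, i) ln).2.1 = (pvMakeMedStep (d, f, i) ln).2.1 := by
      simp only [pvMakeMedStep]
      split_ifs <;> exact ⟨by simp [hln, hd], by simp [hln, hf]⟩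
    rw [List.foldl_cons]
    have hi := ih (pvMakeMedStep (d, f, i) ln).1 (pvMakeMedStep (d, f, i) ln).2.1
      (pvMakeMedStep (d, f, i) ln).2.2 hmem' hstep.1 hstep.2
    simpa using hi

lemma pvCleanup_items (n d f i : String) (hd : PySem.Str.strip d = d) (hf : PySem.Str.strip f = f) :
    (pvCleanupA (PySem.Dict.mk [("name",n),("dose",d),("frequency",f),("instructions",i)])).items
    = [("name", PySem.Str.strip n), ("dose", d), ("frequency", f)] ++
      (if i ≠ "" then [("instructions", i)] else []) := by
  unfold pvCleanupA
  by_cases hi : i = "" <;>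
    simp [PySem.Dict.insert, PySem.Dict.get?, PySem.Dict.contains, PySem.Dict.erase,
      hd, hf, hi]

lemma pvGroup_eq (g : List String) (hg : g ≠ [])
    (hmem : ∀ l ∈ g, PySem.Str.strip l = l) :
    (pvCleanupA (pvDictOf g)).items = pvMakeMed g := by
  cases g with
  | nil => exact absurd rfl hg
  | cons hd tl =>
    have htl : ∀ l ∈ tl, PySem.Str.strip l = l := fun l hl => hmem l (by simp [hl])
    obtain ⟨hsd, hsf⟩ := pvFold_stripped tl "" "" "" htl (pvStrip_idem "") (pvStrip_idem "")
    unfold pvDictOf pvMakeMed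
    simp only [List.headD, List.drop_one, List.tail]
    rw [pvFoldl_shape, pvCleanup_items _ _ _ _ hsd hsf]
    have hname : PySem.Str.strip (pvCleanName hd) = pvCleanName hd := by
      unfold pvCleanName
      exact pvStrip_idem _
    rw [hname]

-- ===== VERDICT (by name: the statement is the Claim_ definition above) =====
theorem parse_free_text_prescription_py_spec : Claim_equal_parse_free_text_prescription_py := by
  unfold Claim_equal_parse_free_text_prescription_py
  intro text _
  unfold Spec_parse_free_text_prescription_py
  simp only [parse_free_text_prescription_py, parse_free_text_prescription_py_alt]
  have hstrip := pvCleanLines_stripped text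
  have hwf : ∀ g ∈ (pvCleanLines text).foldl pvGroupStep [], g ≠ [] :=
    pvGroups_nonempty _ [] (by simp)
  have hmem : ∀ g ∈ (pvCleanLines text).foldl pvGroupStep [], ∀ l ∈ g, PySem.Str.strip l = l :=
    pvGroups_mem _ [] (by simp) hstrip
  have h0 : ([], none) = pvAStateOf [] := rfl
  rw [h0, pvMain_fold _ [] (by simp)]
  set gs := (pvCleanLines text).foldl pvGroupStep [] with hgs
  have hmeds : (match (pvAStateOf gs).2 with
      | some c => (pvAStateOf gs).1 ++ [c] | none => (pvAStateOf gs).1) = gs.map pvDictOf := by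
    clear hwf hmem
    cases gs with
    | nil => simp [pvAStateOf]
    | cons g t =>
      have hne : g :: t ≠ [] := by simp
      have hst : pvAStateOf (g :: t)
          = ((g :: t).dropLast.map pvDictOf, some (pvDictOf ((g :: t).getLast hne))) := by
        unfold pvAStateOf
        rw [List.getLast?_eq_some_getLast hne]
      rw [hst]
      show (g :: t).dropLast.map pvDictOf ++ [pvDictOf ((g :: t).getLast hne)]
          = (g :: t).map pvDictOf
      rw [show [pvDictOf ((g :: t).getLast hne)]
          = List.map pvDictOf [(g :: t).getLast hne] from rfl,
        ← List.map_append, List.dropLast_concat_getLast]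
  rw [hmeds, List.map_map, List.map_map]
  exact List.map_congr_left fun g hg => pvGroup_eq g (hwf g hg) (hmem g hg)
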